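-- pv_equiv track=rewrite | github.com/Savotto/Defect-free-lattice_parallel | defect_free/movement.py | compress_path
-- ===== SOURCE A (Python) =====
-- def compress_path(path):
--     """
--     Compresses consecutive horizontal or vertical movements in a path into single steps.
--
--     Args:
--         path: List of positions forming the path
--
--     Returns:
--         Compressed path with fewer, larger steps
--     """
--     if not path or len(path) <= 2:
--         return path  # Nothing to compress for trivial paths
--
--     compressed = [path[0]]  # Always include the first position
--     i = 1
--
--     while i < len(path):
--         # Track the current direction by checking adjacent points
--         row_dir = path[i][0] - path[i-1][0]  # -1: up, 0: same row, 1: down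
--         col_dir = path[i][1] - path[i-1][1]  # -1: left, 0: same col, 1: right
--
--         # Find the end of this direction segment
--         curr_i = i
--         while curr_i + 1 < len(path):
--             next_row_dir = path[curr_i+1][0] - path[curr_i][0]
--             next_col_dir = path[curr_i+1][1] - path[curr_i][1]
--
--             # If direction changes, stop here
--             if next_row_dir != row_dir or next_col_dir != col_dir:
--                 break
--
--             curr_i += 1
--
--         # Add the end point of this segment
--         compressed.append(path[curr_i])
--         i = curr_i + 1
--
--     return compressed
-- ===== SOURCE B (Python) =====
-- def compress_path(path):
--     """Flat single-pass direction-change scan instead of nested segment-growing loops."""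
--     if not path or len(path) <= 2:
--         return path
--     n = len(path)
--     compressed = [path[0]]
--     for k in range(n - 1):
--         d = (path[k+1][0] - path[k][0], path[k+1][1] - path[k][1])
--         if k == n - 2 or (path[k+2][0] - path[k+1][0], path[k+2][1] - path[k+1][1]) != d:
--             compressed.append(path[k+1])
--     return compressed
-- ===== Notes on version B (the rewrite author's own statement) =====
-- stated objective: simpler
-- what changed: Replaces A's nested grow-a-segment-then-skip while loops with one flat pass that appends a point exactly when the direction changes (or at the last step).
import Mathlib
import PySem

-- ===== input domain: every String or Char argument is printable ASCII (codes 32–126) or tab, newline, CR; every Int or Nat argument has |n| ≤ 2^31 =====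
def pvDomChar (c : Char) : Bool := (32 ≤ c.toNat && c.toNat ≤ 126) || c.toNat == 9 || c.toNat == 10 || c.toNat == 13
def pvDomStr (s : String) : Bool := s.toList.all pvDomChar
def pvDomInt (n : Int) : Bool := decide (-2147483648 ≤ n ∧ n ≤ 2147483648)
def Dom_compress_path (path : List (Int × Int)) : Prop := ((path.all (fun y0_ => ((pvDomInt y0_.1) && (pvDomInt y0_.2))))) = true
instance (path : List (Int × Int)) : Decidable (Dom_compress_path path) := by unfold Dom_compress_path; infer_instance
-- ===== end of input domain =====

-- B replaces A's nested grow-a-segment-then-skip loops with one flat direction-change scan; same O(n) cost, simpler.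
-- ===== PORT A =====
-- inner while loop: advance while the next step keeps direction `dir`; returns (segment end point, remaining path)
def aInner (dir : Int × Int) (curr : Int × Int) : List (Int × Int) → (Int × Int) × List (Int × Int)
  | [] => (curr, [])
  | q :: rest =>
    if (q.1 - curr.1, q.2 - curr.2) ≠ dir then (curr, q :: rest)
    else aInner dir q rest

theorem aInner_length (dir curr : Int × Int) (l : List (Int × Int)) :
    (aInner dir curr l).2.length ≤ l.length := by
  induction l generalizing curr with
  | nil => simp [aInner]
  | cons q rest ih =>
    simp only [aInner]
    split
    · simp
    · exact le_trans (ih q) (by simp)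

-- outer while loop: prev is path[i-1], l is path[i:]
def aOuter (prev : Int × Int) (l : List (Int × Int)) : List (Int × Int) :=
  match l with
  | [] => []
  | q :: rest =>
    let s := aInner (q.1 - prev.1, q.2 - prev.2) q rest
    s.1 :: aOuter s.1 s.2
termination_by l.length
decreasing_by
  have := aInner_length (q.1 - prev.1, q.2 - prev.2) q rest
  simp only [List.length_cons]
  omega

def compress_path (path : List (Int × Int)) : List (Int × Int) :=
  if path.length ≤ 2 then path  -- covers `not path` too
  else
    match path with
    | [] => path
    | p0 :: rest => p0 :: aOuter p0 rest

-- ===== PORT B =====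
-- flat scan: p = path[k], q = path[k+1], rest = path[k+2:]; append q at the last index or on a direction change
def bScan (p q : Int × Int) : List (Int × Int) → List (Int × Int)
  | [] => [q]
  | r :: rest =>
    if (r.1 - q.1, r.2 - q.2) ≠ (q.1 - p.1, q.2 - p.2) then q :: bScan q r rest
    else bScan q r rest

def compress_path_alt (path : List (Int × Int)) : List (Int × Int) :=
  if path.length ≤ 2 then path
  else
    match path with
    | [] => path
    | [p0] => path
    | p0 :: p1 :: rest => p0 :: bScan p0 p1 rest

-- ===== PRECONDITION & SPEC =====
def Spec_compress_path (path : List (Int × Int)) (out : List (Int × Int)) : Prop := out = compress_path_alt path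
instance (path : List (Int × Int)) (out : List (Int × Int)) : Decidable (Spec_compress_path path out) := by unfold Spec_compress_path; infer_instance

-- ===== CLAIM (what is proved, stated in full; the proofs are below) =====
def Claim_equal_compress_path : Prop := ∀ (path : List (Int × Int)), Dom_compress_path path → Spec_compress_path path (compress_path path)

-- ===== LEMMAS AND PROOFS =====

-- When the incoming direction continues through q, A's outer loop starting before q
-- gives the same result as starting at q.
theorem aOuter_skip (p q r : Int × Int) (rest : List (Int × Int))
    (h : (r.1 - q.1, r.2 - q.2) = (q.1 - p.1, q.2 - p.2)) :
    aOuter p (q :: r :: rest) = aOuter q (r :: rest) := by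
  rw [aOuter, aOuter]
  simp only [aInner, h, ite_not, if_true]

theorem aOuter_eq_bScan (rest : List (Int × Int)) (p q : Int × Int) :
    aOuter p (q :: rest) = bScan p q rest := by
  induction rest generalizing p q with
  | nil => simp [aOuter, aInner, bScan]
  | cons r rest ih =>
    by_cases h : (r.1 - q.1, r.2 - q.2) = (q.1 - p.1, q.2 - p.2)
    · rw [aOuter_skip p q r rest h, bScan, if_neg (by simp [h]), ih]
    · rw [aOuter, bScan, if_pos h]
      simp only [aInner, if_pos h]
      exact congrArg _ (ih q r)

-- ===== VERDICT (by name: the statement is the Claim_ definition above) =====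
theorem compress_path_spec : Claim_equal_compress_path := by
  intro path _
  unfold Spec_compress_path compress_path compress_path_alt
  match path with
  | [] => rfl
  | [p0] => rfl
  | [p0, p1] => rfl
  | p0 :: p1 :: p2 :: rest =>
    rw [if_neg (by simp), if_neg (by simp)]
    exact congrArg _ (aOuter_eq_bScan (p2 :: rest) p0 p1)
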